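-- pv_equiv track=rewrite | github.com/salt-formulas/salt-formula-linux | _modules/linux_hosts.py | fqdn_sort_fn
-- ===== SOURCE A (Python) =====
-- def fqdn_sort_fn(n1, n2):
--     l1 = n1.split('.')
--     l2 = n2.split('.')
--     if len(l1) > len(l2):
--         return -1
--     if len(l1) < len(l2):
--         return 1
--     for i1, i2 in zip(l1, l2):
--         if i1 < i2:
--             return -1
--         if i1  > i2:
--             return 1
--     return 0
-- ===== SOURCE B (Python) =====
-- def fqdn_sort_fn(n1, n2):
--     # Character-level comparison: never builds label lists.
--     # More dots (= more components) sorts first; on equal dot counts,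
--     # comparing characters with '.' ranked below every other character
--     # is exactly lexicographic comparison of the component lists,
--     # with string length as the final tie-break.
--     d1 = sum(c == '.' for c in n1)
--     d2 = sum(c == '.' for c in n2)
--     if d1 != d2:
--         return -1 if d1 > d2 else 1
--     for a, b in zip(n1, n2):
--         ka = -1 if a == '.' else ord(a)
--         kb = -1 if b == '.' else ord(b)
--         if ka != kb:
--             return -1 if ka < kb else 1
--     if len(n1) != len(n2):
--         return -1 if len(n1) < len(n2) else 1
--     return 0
-- ===== Notes on version B (the rewrite author's own statement) =====
-- stated objective: alternative
-- what changed: B never builds the component lists: it counts dots in one character pass and then compares the two strings character by character with '.' ranked below every other character (plus a final length tie-break), which is proved equal to A's split-then-compare-labels strategy.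
import Mathlib
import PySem

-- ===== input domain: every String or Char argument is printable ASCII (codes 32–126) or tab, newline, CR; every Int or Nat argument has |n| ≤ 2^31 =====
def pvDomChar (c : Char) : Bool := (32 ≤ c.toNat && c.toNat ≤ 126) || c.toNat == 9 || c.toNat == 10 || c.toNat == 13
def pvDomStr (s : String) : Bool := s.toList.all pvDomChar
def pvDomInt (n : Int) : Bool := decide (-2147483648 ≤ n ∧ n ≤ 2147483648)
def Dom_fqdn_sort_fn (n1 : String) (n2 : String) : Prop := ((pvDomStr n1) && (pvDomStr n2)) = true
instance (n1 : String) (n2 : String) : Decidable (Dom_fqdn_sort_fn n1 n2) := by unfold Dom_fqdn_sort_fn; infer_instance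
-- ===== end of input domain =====

-- B compares the FQDNs character by character ('.' ranked below every character, dot-count
-- prepass, length tie-break) instead of splitting into component lists (alternative).

-- ===== PORT A =====
-- the 'for i1, i2 in zip(l1, l2)' loop of A
def fqdnLoopA : List (String × String) → Int
  | [] => 0
  | (i1, i2) :: rest =>
      if i1 < i2 then -1
      else if i1 > i2 then 1
      else fqdnLoopA rest

def fqdn_sort_fn (n1 : String) (n2 : String) : Int :=
  let l1 := (PySem.Str.split? n1 ".").getD []
  let l2 := (PySem.Str.split? n2 ".").getD []
  if l1.length > l2.length then -1
  else if l1.length < l2.length then 1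
  else fqdnLoopA (l1.zip l2)

-- ===== PORT B =====
-- ka/kb of Source B: '.' maps to -1, any other character to its code point
def keyC (c : Char) : Int := if c == '.' then -1 else (c.toNat : Int)

-- the 'for a, b in zip(n1, n2)' loop of B; none = the loop fell through
def fqdnLoopB : List (Char × Char) → Option Int
  | [] => none
  | (a, b) :: rest =>
      if keyC a ≠ keyC b then some (if keyC a < keyC b then -1 else 1)
      else fqdnLoopB rest

def fqdn_sort_fn_alt (n1 : String) (n2 : String) : Int :=
  let d1 := n1.toList.countP (· == '.')   -- sum(c == '.' for c in n1)
  let d2 := n2.toList.countP (· == '.')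
  if d1 ≠ d2 then (if d1 > d2 then -1 else 1)
  else
    match fqdnLoopB (n1.toList.zip n2.toList) with
    | some r => r
    | none =>
        if PySem.Str.len n1 ≠ PySem.Str.len n2 then
          (if PySem.Str.len n1 < PySem.Str.len n2 then -1 else 1)
        else 0

-- ===== PRECONDITION & SPEC =====
def Spec_fqdn_sort_fn (n1 : String) (n2 : String) (out : Int) : Prop := out = fqdn_sort_fn_alt n1 n2
instance (n1 : String) (n2 : String) (out : Int) : Decidable (Spec_fqdn_sort_fn n1 n2 out) := by unfold Spec_fqdn_sort_fn; infer_instance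

-- ===== CLAIM (what is proved, stated in full; the proofs are below) =====
def Claim_equal_fqdn_sort_fn : Prop := ∀ (n1 : String) (n2 : String), Dom_fqdn_sort_fn n1 n2 → Spec_fqdn_sort_fn n1 n2 (fqdn_sort_fn n1 n2)

-- ===== LEMMAS AND PROOFS =====

-- '.'-split of a char list as (first label, remaining labels): the label list is never empty
def splitDot : List Char → List Char × List (List Char)
  | [] => ([], [])
  | c :: rest =>
      let p := splitDot rest
      if c == '.' then ([], p.1 :: p.2) else (c :: p.1, p.2)

theorem splitOn_go_dot (fuel : Nat) (l cur : List Char) (acc : List (List Char))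
    (h : l.length ≤ fuel) :
    PySem.Chars.splitOn.go ['.'] fuel l cur acc =
      acc.reverse ++ ((cur.reverse ++ (splitDot l).1) :: (splitDot l).2) := by
  induction fuel generalizing l cur acc with
  | zero =>
    interval_cases hl : l.length
    cases l with
    | nil => simp [PySem.Chars.splitOn.go, splitDot]
    | cons c rest => simp at hl
  | succ f ih =>
    cases l with
    | nil => simp [PySem.Chars.splitOn.go, splitDot]
    | cons c rest =>
      simp only [List.length_cons, Nat.succ_le_succ_iff] at h
      by_cases hc : c = '.'
      · subst hc
        have : PySem.Chars.splitOn.go ['.'] (f+1) ('.' :: rest) cur acc =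
            PySem.Chars.splitOn.go ['.'] f rest [] (cur.reverse :: acc) := by
          simp [PySem.Chars.splitOn.go, List.isPrefixOf]
        rw [this, ih rest [] (cur.reverse :: acc) h]
        simp [splitDot]
      · have : PySem.Chars.splitOn.go ['.'] (f+1) (c :: rest) cur acc =
            PySem.Chars.splitOn.go ['.'] f rest (c :: cur) acc := by
          simp [PySem.Chars.splitOn.go, List.isPrefixOf, Ne.symm hc]
        rw [this, ih rest (c :: cur) acc h]
        simp [splitDot, hc]

theorem splitOn_dot (s : List Char) :
    PySem.Chars.splitOn s ['.'] = (splitDot s).1 :: (splitDot s).2 := by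
  have := splitOn_go_dot (s.length + 1) s [] [] (by omega)
  simpa [PySem.Chars.splitOn] using this

theorem splitDot_count (s : List Char) :
    (splitDot s).2.length = s.countP (· == '.') := by
  induction s with
  | nil => simp [splitDot]
  | cons c rest ih =>
    by_cases hc : c = '.'
    · subst hc; simp [splitDot, ih]
    · simp [splitDot, hc, ih]

theorem splitDot_no_dot (s : List Char) (h : s.countP (· == '.') = 0) :
    splitDot s = (s, []) := by
  induction s with
  | nil => simp [splitDot]
  | cons c rest ih =>
    simp only [List.countP_cons] at h
    by_cases hc : c = '.'
    · subst hc; simp at h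
    · have hcb : (c == '.') = false := by simp [hc]
      rw [hcb] at h
      simp only [if_false, Bool.false_eq_true, Nat.add_zero] at h
      simp [splitDot, hc, ih h]

-- facts about keyC
theorem keyC_dot_lt (b : Char) (hb : b ≠ '.') : keyC '.' < keyC b := by
  have hb' : (b == '.') = false := by simp [hb]
  simp [keyC, hb']
  omega

theorem keyC_lt_iff (a b : Char) (ha : a ≠ '.') (hb : b ≠ '.') :
    keyC a < keyC b ↔ a < b := by
  have ha' : (a == '.') = false := by simp [ha]
  have hb' : (b == '.') = false := by simp [hb]
  simp only [keyC, ha', hb', Bool.false_eq_true, if_false]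
  constructor
  · intro h
    exact Char.lt_def.mpr (UInt32.lt_iff_toNat_lt.mpr (by exact_mod_cast h))
  · intro h
    have h' : a.toNat < b.toNat := UInt32.lt_iff_toNat_lt.mp (Char.lt_def.mp h)
    exact_mod_cast h'

theorem keyC_eq_iff (a b : Char) : keyC a = keyC b ↔ a = b := by
  constructor
  · intro h
    by_cases ha : a = '.' <;> by_cases hb : b = '.'
    · rw [ha, hb]
    · exact absurd h (ne_of_lt (ha ▸ keyC_dot_lt b hb))
    · exact absurd h.symm (ne_of_lt (hb ▸ keyC_dot_lt a ha))
    · have ha' : (a == '.') = false := by simp [ha]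
      have hb' : (b == '.') = false := by simp [hb]
      simp only [keyC, ha', hb', Bool.false_eq_true, if_false] at h
      exact Char.ext (UInt32.toNat_inj.mp (by exact_mod_cast h))
  · intro h; rw [h]

-- B's comparison as one structural recursion (loop + length tie-break fused)
def cmpB : List Char → List Char → Int
  | [], [] => 0
  | [], _ :: _ => -1
  | _ :: _, [] => 1
  | a :: s, b :: t =>
      if keyC a ≠ keyC b then (if keyC a < keyC b then -1 else 1) else cmpB s t

theorem loopB_eq_cmpB (s t : List Char) :
    (match fqdnLoopB (s.zip t) with
     | some r => r
     | none =>
         if s.length ≠ t.length then (if s.length < t.length then -1 else 1) else 0) = cmpB s t := by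
  induction s generalizing t with
  | nil =>
    cases t with
    | nil => simp [fqdnLoopB, cmpB]
    | cons b t' => simp [fqdnLoopB, cmpB]
  | cons a s' ih =>
    cases t with
    | nil => simp [fqdnLoopB, cmpB]
    | cons b t' =>
      by_cases hk : keyC a = keyC b
      · simp only [List.zip_cons_cons, fqdnLoopB, cmpB, hk, ne_eq, not_true_eq_false,
          if_false, List.length_cons, ite_not]
        have := ih t'
        simp only [ne_eq, ite_not] at this
        simpa [Nat.succ_lt_succ_iff] using this
      · simp [List.zip_cons_cons, fqdnLoopB, cmpB, hk]

-- A's label loop, restated over char lists (the labels, before String.ofList)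
def loopAL : List (List Char) → List (List Char) → Int
  | [], _ => 0
  | _ :: _, [] => 0
  | x :: xs, y :: ys => if x < y then -1 else if y < x then 1 else loopAL xs ys

theorem loopA_eq_loopAL (r1 r2 : List (List Char)) :
    fqdnLoopA ((r1.map String.ofList).zip (r2.map String.ofList)) = loopAL r1 r2 := by
  induction r1 generalizing r2 with
  | nil => simp [fqdnLoopA, loopAL]
  | cons x xs ih =>
    cases r2 with
    | nil => simp [fqdnLoopA, loopAL]
    | cons y ys =>
      simp only [List.map_cons, List.zip_cons_cons, fqdnLoopA, loopAL, gt_iff_lt,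
        String.lt_iff_toList_lt, String.toList_ofList]
      rw [ih ys]

-- A's label loop (over the split results) equals B's character comparison when dot counts agree
theorem labels_eq_cmpB (s t : List Char)
    (h : s.countP (· == '.') = t.countP (· == '.')) :
    loopAL ((splitDot s).1 :: (splitDot s).2) ((splitDot t).1 :: (splitDot t).2) = cmpB s t := by
  induction s generalizing t with
  | nil =>
    cases t with
    | nil => simp [splitDot, loopAL, cmpB]
    | cons b t' =>
      simp only [List.countP_nil] at h
      rw [splitDot_no_dot (b :: t') h.symm]
      simp [splitDot, loopAL, cmpB, List.nil_lt_cons]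
  | cons a s' ih =>
    cases t with
    | nil =>
      simp only [List.countP_nil] at h
      rw [splitDot_no_dot (a :: s') h]
      simp [splitDot, loopAL, cmpB, List.nil_lt_cons]
    | cons b t' =>
      by_cases ha : a = '.' <;> by_cases hb : b = '.'
      · -- both dots: strip the empty first label and recurse on the remaining labels
        subst ha; subst hb
        have h' : s'.countP (· == '.') = t'.countP (· == '.') := by
          simpa [List.countP_cons] using h
        simp only [splitDot, beq_self_eq_true, if_pos, loopAL, cmpB, List.not_lt_nil,
          if_false, ne_eq, not_true_eq_false]
        exact ih t' h'
      · -- a is a dot, b is not: A sees '' < first label of t; B sees keyC '.' < keyC b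
        subst ha
        have hb' : (b == '.') = false := by simp [hb]
        have hk := keyC_dot_lt b hb
        simp [splitDot, hb', loopAL, cmpB, List.nil_lt_cons, hk, ne_of_lt hk]
      · -- b is a dot, a is not
        subst hb
        have ha' : (a == '.') = false := by simp [ha]
        have hk := keyC_dot_lt a ha
        have hne : keyC a ≠ keyC '.' := (ne_of_lt hk).symm
        have hnlt : ¬ keyC a < keyC '.' := not_lt_of_gt hk
        simp [splitDot, ha', loopAL, cmpB, List.nil_lt_cons, List.not_lt_nil, hne, hnlt]
      · -- neither is a dot: the first labels start with a resp. b
        have ha' : (a == '.') = false := by simp [ha]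
        have hb' : (b == '.') = false := by simp [hb]
        have hcnt : s'.countP (· == '.') = t'.countP (· == '.') := by
          simpa [List.countP_cons, ha', hb'] using h
        simp only [splitDot, ha', hb', Bool.false_eq_true, if_false]
        by_cases hab : a = b
        · subst hab
          have hc1 : ∀ x y : List Char, a :: x < a :: y ↔ x < y := by
            intro x y
            rw [List.cons_lt_cons_iff]
            simp
          have ihh := ih t' hcnt
          simp only [loopAL, cmpB, hc1, ne_eq, not_true_eq_false, if_false] at ihh ⊢
          exact ihh
        · have hkne : keyC a ≠ keyC b := fun hh => hab ((keyC_eq_iff a b).mp hh)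
          by_cases hlt : a < b
          · have h1 : (a :: (splitDot s').1) < (b :: (splitDot t').1) :=
              List.cons_lt_cons_iff.mpr (Or.inl hlt)
            have hk : keyC a < keyC b := (keyC_lt_iff a b ha hb).mpr hlt
            simp [loopAL, cmpB, h1, hkne, hk]
          · have hgt : b < a := by
              rcases lt_trichotomy a b with h' | h' | h'
              · exact absurd h' hlt
              · exact absurd h' hab
              · exact h'
            have h1 : ¬ (a :: (splitDot s').1) < (b :: (splitDot t').1) := by
              intro hh
              rcases List.cons_lt_cons_iff.mp hh with h' | ⟨h', _⟩
              · exact absurd h' (not_lt_of_gt hgt)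
              · exact hab h'
            have h2 : (b :: (splitDot t').1) < (a :: (splitDot s').1) :=
              List.cons_lt_cons_iff.mpr (Or.inl hgt)
            have hk : ¬ keyC a < keyC b := by
              intro hh; exact absurd ((keyC_lt_iff a b ha hb).mp hh) (not_lt_of_gt hgt)
            simp [loopAL, cmpB, h1, h2, hkne, hk]

-- the split? call of A's port, expressed through splitDot
theorem split?_dot (n : String) :
    (PySem.Str.split? n ".").getD [] =
      ((splitDot n.toList).1 :: (splitDot n.toList).2).map String.ofList := by
  have : ".".toList = ['.'] := rfl
  simp [PySem.Str.split?, PySem.Chars.split?, this, splitOn_dot]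

-- ===== VERDICT (by name: the statement is the Claim_ definition above) =====
theorem fqdn_sort_fn_spec : Claim_equal_fqdn_sort_fn := by
  intro n1 n2 _
  unfold Spec_fqdn_sort_fn fqdn_sort_fn fqdn_sort_fn_alt
  rw [split?_dot n1, split?_dot n2]
  simp only [List.length_map, List.length_cons, splitDot_count, PySem.Str.len_eq]
  set d1 := n1.toList.countP (· == '.') with hd1
  set d2 := n2.toList.countP (· == '.') with hd2
  rcases lt_trichotomy d1 d2 with h | h | h
  · have : ¬ d1 + 1 > d2 + 1 := by omega
    have h2 : d1 + 1 < d2 + 1 := by omega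
    simp [this, h2, ne_of_lt h, Nat.lt_asymm h]
  · have h1 : ¬ d1 + 1 > d2 + 1 := by omega
    have h2 : ¬ d1 + 1 < d2 + 1 := by omega
    rw [if_neg h1, if_neg h2, if_neg (by omega : ¬ d1 ≠ d2)]
    rw [loopA_eq_loopAL, labels_eq_cmpB n1.toList n2.toList (by rw [← hd1, ← hd2]; omega)]
    rw [← loopB_eq_cmpB n1.toList n2.toList]
    simp
  · have h1 : d1 + 1 > d2 + 1 := by omega
    simp [h1, ne_of_gt h, h]
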